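-- pv_equiv track=rewrite | github.com/dezsokee/diszkret_matematika | Itthon/gyakorlat_2.py | gyorshatvany
-- ===== SOURCE A (Python) =====
-- def gyorshatvany(x, n):
--     res, szor = 1, 0
--
--     while n != 0:
--         if n % 2 == 1:
--             res *= x
--             szor +=1
--         x *= x
--         szor += 1
--         n = n // 2
--
--     return res, szor
-- ===== SOURCE B (Python) =====
-- def gyorshatvany(x, n):
--     # recursive binary decomposition of the exponent; counts the same
--     # multiplications as the loop version (including the final wasted squaring)
--     if n == 0:
--         return 1, 0
--     r, c = gyorshatvany(x * x, n // 2)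
--     c += 1  # the squaring
--     if n % 2 == 1:
--         return r * x, c + 1
--     return r, c
-- ===== Notes on version B (the rewrite author's own statement) =====
-- stated objective: alternative
-- what changed: Replaced the imperative while-loop with accumulators by a direct recursion on the binary decomposition of the exponent (base case n==0, recurse on (x*x, n//2)).
import Mathlib
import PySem

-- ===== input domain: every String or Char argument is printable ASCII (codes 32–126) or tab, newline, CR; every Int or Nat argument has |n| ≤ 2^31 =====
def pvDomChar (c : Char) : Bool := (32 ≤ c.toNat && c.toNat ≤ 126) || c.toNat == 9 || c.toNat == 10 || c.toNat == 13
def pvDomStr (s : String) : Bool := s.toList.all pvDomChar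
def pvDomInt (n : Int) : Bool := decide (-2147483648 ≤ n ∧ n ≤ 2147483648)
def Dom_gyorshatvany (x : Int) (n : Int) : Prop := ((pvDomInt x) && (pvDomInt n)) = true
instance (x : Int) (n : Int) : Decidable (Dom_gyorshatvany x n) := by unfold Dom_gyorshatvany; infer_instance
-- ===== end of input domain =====

-- B replaces A's while-loop with a direct recursion on the binary decomposition of the exponent (alternative decomposition, same cost).

-- ===== PORT A =====
-- the while loop of A; the `n ≤ 0` guard only makes it total where Python diverges (n < 0, outside Pre_)
def gyLoop (res szor x n : Int) : Int × Int :=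
  if h : n ≤ 0 then (res, szor)
  else
    let rs := if PySem.Int.mod n 2 = 1 then (res * x, szor + 1) else (res, szor)
    gyLoop rs.1 (rs.2 + 1) (x * x) (PySem.Int.floordiv n 2)
termination_by n.toNat
decreasing_by
  rw [PySem.Int.floordiv_eq_ediv_of_pos (by omega)]
  omega

def gyorshatvany (x : Int) (n : Int) : Int × Int := gyLoop 1 0 x n

-- ===== PORT B =====
-- recursion on the exponent; the `n ≤ 0` guard only makes it total where Python hits RecursionError (n < 0, outside Pre_)
def gyorshatvany_alt (x : Int) (n : Int) : Int × Int :=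
  if _h : n ≤ 0 then (1, 0)
  else
    let rc := gyorshatvany_alt (x * x) (PySem.Int.floordiv n 2)
    let c := rc.2 + 1
    if PySem.Int.mod n 2 = 1 then (rc.1 * x, c + 1) else (rc.1, c)
termination_by n.toNat
decreasing_by
  rw [PySem.Int.floordiv_eq_ediv_of_pos (by omega)]
  omega

-- ===== PRECONDITION & SPEC =====
-- Pre_ excludes n < 0: there A loops forever (n // 2 stabilises at -1) and B raises RecursionError.
def Pre_gyorshatvany (x : Int) (n : Int) : Prop := 0 ≤ n
instance (x : Int) (n : Int) : Decidable (Pre_gyorshatvany x n) := by unfold Pre_gyorshatvany; infer_instance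
def pvWitness_gyorshatvany : Int × Int := (3, 11)

def Spec_gyorshatvany (x : Int) (n : Int) (out : Int × Int) : Prop := out = gyorshatvany_alt x n
instance (x : Int) (n : Int) (out : Int × Int) : Decidable (Spec_gyorshatvany x n out) := by unfold Spec_gyorshatvany; infer_instance

-- ===== CLAIM (what is proved, stated in full; the proofs are below) =====
def Claim_equal_gyorshatvany : Prop := ∀ (x : Int) (n : Int), Dom_gyorshatvany x n → Pre_gyorshatvany x n → Spec_gyorshatvany x n (gyorshatvany x n)

-- ===== LEMMAS AND PROOFS =====

-- loop invariant: the loop multiplies `res` by B's result and adds B's count to `szor`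
theorem gyLoop_eq_alt (k : Nat) : ∀ (n : Int), n.toNat = k → 0 ≤ n →
    ∀ (res szor x : Int),
      gyLoop res szor x n = (res * (gyorshatvany_alt x n).1, szor + (gyorshatvany_alt x n).2) := by
  induction k using Nat.strong_induction_on with
  | _ k ih =>
    intro n hk hn res szor x
    rw [gyLoop, gyorshatvany_alt]
    by_cases h0 : n ≤ 0
    · simp [gyLoop, h0]
    · simp only [h0, dif_neg, not_false_iff]
      have hpos : 0 < n := by omega
      have hdiv : PySem.Int.floordiv n 2 = n / 2 :=
        PySem.Int.floordiv_eq_ediv_of_pos (by omega)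
      have hlt : (PySem.Int.floordiv n 2).toNat < k := by rw [hdiv]; omega
      have hnn : 0 ≤ PySem.Int.floordiv n 2 := by rw [hdiv]; omega
      have ihm := ih _ hlt (PySem.Int.floordiv n 2) rfl hnn
      by_cases hm : PySem.Int.mod n 2 = 1
      · simp only [hm, if_pos]
        rw [ihm]
        simp only [Prod.mk.injEq]; constructor <;> first | trivial | ring
      · simp only [hm, if_neg, not_false_iff]
        rw [ihm]
        simp only [Prod.mk.injEq]; constructor <;> first | trivial | ring

-- ===== VERDICT (by name: the statement is the Claim_ definition above) =====
theorem gyorshatvany_spec : Claim_equal_gyorshatvany := by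
  intro x n _ hn
  unfold Spec_gyorshatvany gyorshatvany
  rw [gyLoop_eq_alt n.toNat n rfl hn]
  simp
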